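-- pv_equiv track=rewrite | github.com/Ashmin-Bhattarai/Web-Development | dev.py | check
-- ===== SOURCE A (Python) =====
-- def check(num):
--     count1 = 0
--     count0 = 0
--     for i in num:
--         if i == "1":
--
--             if count0 % 2 != 0:
--                 return "no"
--             else:
--                 count0 = 0
--
--             count1 += 1
--         else:
--
--             if count1 % 2 == 0 and count1 != 0:
--                 return "no"
--             else:
--                 count1 = 0
--
--             count0 += 1
--
--     if count1 % 2 == 0 and count1 != 0:
--         return "no"
--
--     if count0 % 2 != 0:
--         return "no"
--
--     return "yes"
-- ===== SOURCE B (Python) =====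
-- def check(num):
--     # Run-based validation: each maximal run of '1's must have odd length,
--     # each maximal run of non-'1' chars must have even length.
--     n = len(num)
--     i = 0
--     while i < n:
--         b = num[i] == "1"
--         j = i + 1
--         while j < n and (num[j] == "1") == b:
--             j += 1
--         run = j - i
--         if b and run % 2 == 0:
--             return "no"
--         if not b and run % 2 == 1:
--             return "no"
--         i = j
--     return "yes"
-- ===== Notes on version B (the rewrite author's own statement) =====
-- stated objective: alternative
-- what changed: Replaced A's streaming two-counter state machine (with early returns and counter resets) by a two-pointer scan over maximal runs: find each maximal run of '1'/non-'1' chars and check its length parity (ones-runs odd, zero-runs even).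
import Mathlib
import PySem

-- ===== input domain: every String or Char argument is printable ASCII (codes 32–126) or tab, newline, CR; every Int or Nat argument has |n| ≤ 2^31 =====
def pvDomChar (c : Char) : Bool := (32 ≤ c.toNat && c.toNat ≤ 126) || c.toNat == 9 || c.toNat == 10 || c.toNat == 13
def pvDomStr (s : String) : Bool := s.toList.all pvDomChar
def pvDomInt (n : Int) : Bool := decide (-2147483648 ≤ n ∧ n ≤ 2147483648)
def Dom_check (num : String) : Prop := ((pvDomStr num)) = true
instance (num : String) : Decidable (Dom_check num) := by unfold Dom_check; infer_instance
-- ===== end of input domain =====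

-- B validates the string by a two-pointer scan over maximal runs instead of A's
-- streaming two-counter state machine; same O(n) cost, different decomposition.

-- ===== PORT A =====
-- literal transliteration of A's for-loop: state (count1, count0), early returns
def checkLoop : List Char → Nat → Nat → String
  | [], count1, count0 =>
    if count1 % 2 == 0 && count1 != 0 then "no"
    else if count0 % 2 != 0 then "no"
    else "yes"
  | i :: rest, count1, count0 =>
    if i == '1' then
      if count0 % 2 != 0 then "no"
      else checkLoop rest (count1 + 1) 0
    else
      if count1 % 2 == 0 && count1 != 0 then "no"
      else checkLoop rest 0 (count0 + 1)

def check (num : String) : String := checkLoop num.toList 0 0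

-- ===== PORT B =====
-- inner while loop of Source B: length of the leading run matching flag b
def spanLen (b : Bool) : List Char → Nat
  | [] => 0
  | c :: rest => if (c == '1') == b then spanLen b rest + 1 else 0

-- outer while loop of Source B: each iteration consumes one maximal run (i := j)
def checkAltGo : List Char → String
  | [] => "yes"
  | c :: rest =>
    let b := c == '1'
    let run := 1 + spanLen b rest
    if b && run % 2 == 0 then "no"
    else if !b && run % 2 == 1 then "no"
    else checkAltGo (rest.drop (run - 1))
termination_by l => l.length
decreasing_by simp [List.length_drop]

def check_alt (num : String) : String := checkAltGo num.toList

-- ===== PRECONDITION & SPEC =====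
def Spec_check (num : String) (out : String) : Prop := out = check_alt num
instance (num : String) (out : String) : Decidable (Spec_check num out) := by unfold Spec_check; infer_instance

-- ===== CLAIM (what is proved, stated in full; the proofs are below) =====
def Claim_equal_check : Prop := ∀ (num : String), Dom_check num → Spec_check num (check num)

-- ===== LEMMAS AND PROOFS =====

lemma checkAltGo_nil : checkAltGo [] = "yes" := by rw [checkAltGo]

lemma checkAltGo_cons (c : Char) (rest : List Char) :
    checkAltGo (c :: rest) =
      (if (c == '1') && (1 + spanLen (c == '1') rest) % 2 == 0 then "no"
       else if !(c == '1') && (1 + spanLen (c == '1') rest) % 2 == 1 then "no"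
       else checkAltGo (rest.drop (1 + spanLen (c == '1') rest - 1))) := by
  rw [checkAltGo]

lemma checkAltGo_cons_one (rest : List Char) :
    checkAltGo ('1' :: rest) =
      (if (1 + spanLen true rest) % 2 == 0 then "no"
       else checkAltGo (rest.drop (spanLen true rest))) := by
  rw [checkAltGo_cons]; simp

lemma checkAltGo_cons_zero (c : Char) (rest : List Char) (hcb : (c == '1') = false) :
    checkAltGo (c :: rest) =
      (if (1 + spanLen false rest) % 2 == 1 then "no"
       else checkAltGo (rest.drop (spanLen false rest))) := by
  rw [checkAltGo_cons]; simp [hcb]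

-- Main invariant: checkLoop in the ones-state (resp. zeros-state) finishes the
-- current run via spanLen and then proceeds like checkAltGo on the remainder.
lemma main_lemma (l : List Char) :
    (∀ k : Nat, checkLoop l (k + 1) 0 =
      (if (k + 1 + spanLen true l) % 2 == 0 then "no"
       else checkAltGo (l.drop (spanLen true l)))) ∧
    (∀ k : Nat, checkLoop l 0 (k + 1) =
      (if (k + 1 + spanLen false l) % 2 == 1 then "no"
       else checkAltGo (l.drop (spanLen false l)))) ∧
    checkLoop l 0 0 = checkAltGo l := by
  induction l with
  | nil =>
    refine ⟨?_, ?_, ?_⟩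
    · intro k; simp [checkLoop, checkAltGo_nil, spanLen]
    · intro k; simp [checkLoop, checkAltGo_nil, spanLen]
    · simp [checkLoop, checkAltGo_nil]
  | cons c rest ih =>
    obtain ⟨ihP, ihQ, ih0⟩ := ih
    by_cases hc : c = '1'
    · subst hc
      have hsT : spanLen true ('1' :: rest) = spanLen true rest + 1 := by simp [spanLen]
      have hsF : spanLen false ('1' :: rest) = 0 := by simp [spanLen]
      refine ⟨?_, ?_, ?_⟩
      · intro k
        have h1 : checkLoop ('1' :: rest) (k + 1) 0 = checkLoop rest (k + 1 + 1) 0 := by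
          simp [checkLoop]
        rw [h1, ihP (k + 1), hsT]
        have e : k + 1 + 1 + spanLen true rest = k + 1 + (spanLen true rest + 1) := by omega
        rw [e, List.drop_succ_cons]
      · intro k
        rw [hsF, List.drop_zero]
        by_cases hk : (k + 1) % 2 = 1
        · simp [checkLoop, hk]
        · have h0 : (k + 1) % 2 = 0 := by omega
          simp only [Nat.add_zero, h0]
          have h1 : checkLoop ('1' :: rest) 0 (k + 1) = checkLoop rest (0 + 1) 0 := by
            simp [checkLoop, h0]
          rw [h1, ihP 0, checkAltGo_cons_one]
          simp
      · have h1 : checkLoop ('1' :: rest) 0 0 = checkLoop rest (0 + 1) 0 := by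
          simp [checkLoop]
        rw [h1, ihP 0, checkAltGo_cons_one]
    · have hcb : (c == '1') = false := by simp [hc]
      have hsT : spanLen true (c :: rest) = 0 := by simp [spanLen, hcb]
      have hsF : spanLen false (c :: rest) = spanLen false rest + 1 := by simp [spanLen, hcb]
      refine ⟨?_, ?_, ?_⟩
      · intro k
        rw [hsT, List.drop_zero]
        by_cases hk : (k + 1) % 2 = 0
        · simp [checkLoop, hcb, hk]
        · have h1 : (k + 1) % 2 = 1 := by omega
          simp only [Nat.add_zero, h1]
          have h2 : checkLoop (c :: rest) (k + 1) 0 = checkLoop rest 0 (0 + 1) := by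
            simp [checkLoop, hcb, h1]
          rw [h2, ihQ 0, checkAltGo_cons_zero c rest hcb]
          simp
      · intro k
        have h1 : checkLoop (c :: rest) 0 (k + 1) = checkLoop rest 0 (k + 1 + 1) := by
          simp [checkLoop, hcb]
        rw [h1, ihQ (k + 1), hsF]
        have e : k + 1 + 1 + spanLen false rest = k + 1 + (spanLen false rest + 1) := by omega
        rw [e, List.drop_succ_cons]
      · have h1 : checkLoop (c :: rest) 0 0 = checkLoop rest 0 (0 + 1) := by
          simp [checkLoop, hcb]
        rw [h1, ihQ 0, checkAltGo_cons_zero c rest hcb]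

-- ===== VERDICT (by name: the statement is the Claim_ definition above) =====
theorem check_spec : Claim_equal_check := by
  intro num _
  unfold Spec_check check check_alt
  exact (main_lemma num.toList).2.2
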